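-- pv_equiv track=rewrite | github.com/jianningzhuang/CS1010X-Programming_Methodology | extra Prac Exams/1010S 2017 Apr.py | advance_l33tify
-- ===== SOURCE A (Python) =====
-- def rotate(lst):
--     return lst[1:] + [lst[0]]
--
-- def advance_l33tify(string, code):
--     result = ""
--     copy = code.copy()
--     for char in string:
--         if char.isalpha():
--             char = char.lower()
--         if char in copy:
--             result += copy[char][0]
--             copy[char] = rotate(copy[char])
--         else:
--             result += char
--     return result
-- ===== SOURCE B (Python) =====
-- def advance_l33tify(string, code):
--     counts = {}
--     out = []
--     for char in string:
--         if char.isalpha():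
--             char = char.lower()
--         if char in code:
--             lst = code[char]
--             n = counts.get(char, 0)
--             out.append(lst[n % len(lst)])
--             counts[char] = n + 1
--         else:
--             out.append(char)
--     return "".join(out)
-- ===== Notes on version B (the rewrite author's own statement) =====
-- stated objective: simpler
-- what changed: B replaces A's mutable dict copy with per-character rotation of replacement lists by a read-only lookup plus an integer counter dict and modular indexing (code[ch][count % len] instead of copy-and-rotate), collecting pieces and joining once.
import Mathlib
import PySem

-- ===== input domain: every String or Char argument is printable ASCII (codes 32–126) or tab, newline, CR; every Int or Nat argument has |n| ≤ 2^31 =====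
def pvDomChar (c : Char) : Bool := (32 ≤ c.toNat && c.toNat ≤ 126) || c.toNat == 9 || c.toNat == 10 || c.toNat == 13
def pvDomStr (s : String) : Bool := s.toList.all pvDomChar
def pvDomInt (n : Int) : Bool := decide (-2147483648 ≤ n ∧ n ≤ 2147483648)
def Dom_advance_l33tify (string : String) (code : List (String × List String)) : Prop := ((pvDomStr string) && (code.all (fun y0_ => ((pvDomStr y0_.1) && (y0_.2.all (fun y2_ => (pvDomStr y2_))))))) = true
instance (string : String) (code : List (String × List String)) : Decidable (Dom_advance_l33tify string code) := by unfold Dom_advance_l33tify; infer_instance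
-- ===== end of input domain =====

-- B replaces A's copy-and-rotate of the replacement lists by a per-character counter and
-- modular indexing into the unchanged code dict (objective: simpler — no list reallocation).

-- key under which a character is looked up: lowercased if alphabetic
def pvKey (c : Char) : String :=
  String.ofList [if PySem.Chars.isalpha c then PySem.Chars.lowerChar c else c]

-- ===== PORT A =====
-- rotate(lst) = lst[1:] + [lst[0]]  (lst[0] on [] is an IndexError in Python; the .getD "" arm
-- is reached only outside Pre_, where nothing is claimed)
def pvRotate (lst : List String) : List String :=
  PySem.List.slice lst (some 1) none ++ [(PySem.List.pyGet? lst 0).getD ""]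

-- one iteration of A's for-loop: state = (result as chars, mutated copy of the dict)
def pvStepA (st : List Char × PySem.Dict String (List String)) (c : Char) :
    List Char × PySem.Dict String (List String) :=
  let ch := pvKey c
  if st.2.contains ch then
    (st.1 ++ ((PySem.List.pyGet? (st.2.getD ch []) 0).getD "").toList,
     st.2.insert ch (pvRotate (st.2.getD ch [])))
  else
    (st.1 ++ ch.toList, st.2)

def advance_l33tify (string : String) (code : List (String × List String)) : String :=
  String.ofList (string.toList.foldl pvStepA ([], PySem.Dict.ofList code)).1

-- ===== PORT B =====
-- one iteration of B's for-loop: state = (output pieces, per-key counters); the code dict is read-only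
def pvStepB (code0 : PySem.Dict String (List String))
    (st : List String × PySem.Dict String Int) (c : Char) :
    List String × PySem.Dict String Int :=
  let ch := pvKey c
  if code0.contains ch then
    let lst := code0.getD ch []
    let n := st.2.getD ch 0
    (st.1 ++ [(PySem.List.pyGet? lst (PySem.Int.mod n lst.length)).getD ""],
     st.2.insert ch (n + 1))
  else
    (st.1 ++ [ch], st.2)

def advance_l33tify_alt (string : String) (code : List (String × List String)) : String :=
  PySem.Str.join ""
    (string.toList.foldl (pvStepB (PySem.Dict.ofList code)) ([], PySem.Dict.empty)).1

-- ===== PRECONDITION & SPEC =====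
-- Pre_ excludes inputs where some character of the string is translated via an EMPTY replacement
-- list: there A raises IndexError (lst[0] on []) and B raises ZeroDivisionError (n % 0).
def Pre_advance_l33tify (string : String) (code : List (String × List String)) : Prop :=
  (string.toList.all fun c =>
    ((PySem.Dict.ofList code).get? (pvKey c) != some ([] : List String))) = true
instance (string : String) (code : List (String × List String)) : Decidable (Pre_advance_l33tify string code) := by unfold Pre_advance_l33tify; infer_instance

def pvWitness_advance_l33tify : String × (List (String × List String)) :=
  ("Leet code!", [("e", ["3"]), ("o", ["0", "()"]), ("!", ["?!"])])

def Spec_advance_l33tify (string : String) (code : List (String × List String)) (out : String) : Prop := out = advance_l33tify_alt string code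
instance (string : String) (code : List (String × List String)) (out : String) : Decidable (Spec_advance_l33tify string code out) := by unfold Spec_advance_l33tify; infer_instance

-- ===== CLAIM (what is proved, stated in full; the proofs are below) =====
def Claim_equal_advance_l33tify : Prop := ∀ (string : String) (code : List (String × List String)), Dom_advance_l33tify string code → Pre_advance_l33tify string code → Spec_advance_l33tify string code (advance_l33tify string code)

-- ===== LEMMAS AND PROOFS =====

lemma pvRotate_eq_rotate (l : List String) (h : l ≠ []) : pvRotate l = l.rotate 1 := by
  cases l with
  | nil => exact absurd rfl h
  | cons a t => simp [pvRotate, pysem, List.rotate_cons_succ]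

lemma pv_flatten_append (out : List (List Char)) :
    (List.intersperse ([] : List Char) out).flatten = out.flatten := by
  induction out with
  | nil => rfl
  | cons h t ih =>
    cases t with
    | nil => rfl
    | cons h2 t2 => simp_all [List.intersperse]

-- the loop invariant: A's state and B's state stay related
lemma pvLoop_eq (code0 : PySem.Dict String (List String)) (cs : List Char)
    (h : ∀ c ∈ cs, code0.get? (pvKey c) ≠ some [])
    (res : List Char) (dA : PySem.Dict String (List String))
    (out : List String) (counts : PySem.Dict String Int)
    (hres : res = (List.map String.toList out).flatten)
    (hd : ∀ k, dA.get? k = (code0.get? k).map (fun l => l.rotate (counts.getD k 0).toNat))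
    (hpos : ∀ k, 0 ≤ counts.getD k 0) :
    (cs.foldl pvStepA (res, dA)).1 =
      (List.map String.toList ((cs.foldl (pvStepB code0) (out, counts)).1)).flatten := by
  induction cs generalizing res dA out counts with
  | nil => simpa using hres
  | cons c cs ih =>
    simp only [List.foldl_cons]
    have hc := h c (by simp)
    have htail : ∀ c' ∈ cs, code0.get? (pvKey c') ≠ some [] :=
      fun c' hc' => h c' (List.mem_cons_of_mem _ hc')
    have hd_ch := hd (pvKey c)
    by_cases hcont : code0.contains (pvKey c) = true
    · obtain ⟨l0, hl0⟩ : ∃ l0, code0.get? (pvKey c) = some l0 := by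
        rw [PySem.Dict.contains_eq_isSome_get?] at hcont
        exact Option.isSome_iff_exists.mp hcont
      have hne : l0 ≠ [] := fun h' => hc (by rw [hl0, h'])
      have hlen : 0 < l0.length := List.length_pos_iff.mpr hne
      have hn0 : 0 ≤ counts.getD (pvKey c) 0 := hpos (pvKey c)
      set n := counts.getD (pvKey c) 0 with hn
      have hAget : dA.getD (pvKey c) [] = l0.rotate n.toNat :=
        PySem.Dict.getD_of_get?_eq_some _ _ (by rw [hd_ch, hl0]; rfl)
      have hAcont : dA.contains (pvKey c) = true := by
        rw [PySem.Dict.contains_eq_isSome_get?, hd_ch, hl0]; rfl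
      have hmodlt : n.toNat % l0.length < l0.length := Nat.mod_lt _ hlen
      have hstepA : pvStepA (res, dA) c =
          (res ++ (l0[n.toNat % l0.length]'hmodlt).toList,
           dA.insert (pvKey c) (l0.rotate (n.toNat + 1))) := by
        simp only [pvStepA, hAcont, if_true, hAget]
        have h0 : 0 < (l0.rotate n.toNat).length := by simpa using hlen
        rw [show (0:Int) = ((0:Nat):Int) from rfl, PySem.List.pyGet?_ofNat _ 0 h0]
        rw [pvRotate_eq_rotate _ (by simpa using hne), List.rotate_rotate]
        simp [List.getElem_rotate]
      have hBget : code0.getD (pvKey c) [] = l0 := PySem.Dict.getD_of_get?_eq_some _ _ hl0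
      have hstepB : pvStepB code0 (out, counts) c =
          (out ++ [l0[n.toNat % l0.length]'hmodlt],
           counts.insert (pvKey c) (n + 1)) := by
        simp only [pvStepB, hcont, if_true, hBget, ← hn]
        have hmod : PySem.Int.mod n (l0.length : Int) = ((n.toNat % l0.length : Nat) : Int) := by
          rw [PySem.Int.mod_eq_emod_of_pos (by exact_mod_cast hlen)]
          conv_lhs => rw [← Int.toNat_of_nonneg hn0]
          push_cast
          rfl
        rw [hmod, PySem.List.pyGet?_ofNat _ _ hmodlt]
        rfl
      rw [hstepA, hstepB]
      apply ih htail
      · simp [hres]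
      · intro k
        by_cases hk : k = pvKey c
        · subst hk
          rw [PySem.Dict.get?_insert_self _ _ _, PySem.Dict.getD_insert_self _ _ _ _, hl0]
          have : (n + 1).toNat = n.toNat + 1 := by omega
          simp [this]
        · rw [PySem.Dict.get?_insert_of_ne _ _ hk, PySem.Dict.getD_insert_of_ne _ _ _ hk]
          exact hd k
      · intro k
        by_cases hk : k = pvKey c
        · subst hk; rw [PySem.Dict.getD_insert_self _ _ _ _]; omega
        · rw [PySem.Dict.getD_insert_of_ne _ _ _ hk]; exact hpos k
    · have hAcont : dA.contains (pvKey c) = false := by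
        rw [PySem.Dict.contains_eq_isSome_get?, hd_ch]
        rw [PySem.Dict.contains_eq_isSome_get?] at hcont
        cases hget : code0.get? (pvKey c) with
        | some l => exact absurd (by rw [hget]; rfl) hcont
        | none => rfl
      have hstepA : pvStepA (res, dA) c = (res ++ (pvKey c).toList, dA) := by
        simp [pvStepA, hAcont]
      have hstepB : pvStepB code0 (out, counts) c = (out ++ [pvKey c], counts) := by
        simp [pvStepB, hcont]
      rw [hstepA, hstepB]
      exact ih htail _ _ _ _ (by simp [hres]) hd hpos

-- ===== VERDICT (by name: the statement is the Claim_ definition above) =====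
theorem advance_l33tify_spec : Claim_equal_advance_l33tify := by
  intro string code _ hpre
  have hpre' : ∀ c ∈ string.toList, (PySem.Dict.ofList code).get? (pvKey c) ≠ some [] := by
    simpa [Pre_advance_l33tify, List.all_eq_true] using hpre
  unfold Spec_advance_l33tify advance_l33tify advance_l33tify_alt
  simp only [PySem.Str.join, PySem.Chars.join, List.intercalate]
  have hsep : ("" : String).toList = [] := rfl
  rw [hsep, pv_flatten_append]
  congr 1
  apply pvLoop_eq _ _ hpre' [] _ [] _ rfl
  · intro k
    simp only [PySem.Dict.getD_empty, Int.toNat_zero, List.rotate_zero]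
    cases (PySem.Dict.ofList code).get? k <;> rfl
  · intro k
    simp [PySem.Dict.getD_empty]
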